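-- pv_equiv track=rewrite | github.com/aaaalabs/arkify | agents/learning_panel_agent.py | _rank_by_impact
-- ===== SOURCE A (Python) =====
-- from typing import Dict, Any, List
--
-- def _rank_by_impact(items: List[str]) -> List[str]:
--     """
--     AUTONOMY ZONE: Rank items by impact/interest.
--
--     High-impact signals:
--     - Quantitative data (numbers, percentages)
--     - Contrarian language (but, actually, surprisingly, not)
--     - Specificity (concrete > vague)
--
--     For now: Simple heuristic scoring
--     Future: NLP-based sentiment + surprise analysis
--     """
--     def score_item(item: str) -> int:
--         score = 0
--
--         # Numbers = concrete
--         if any(char.isdigit() for char in item):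
--             score += 2
--
--         # Contrarian signals
--         contrarian_words = ['but', 'actually', 'surprisingly', 'not', 'instead', 'however']
--         if any(word in item.lower() for word in contrarian_words):
--             score += 3
--
--         # Specificity (longer = more detail)
--         if len(item) > 40:
--             score += 1
--
--         return score
--
--     # Sort by score (descending)
--     scored = [(item, score_item(item)) for item in items]
--     scored.sort(key=lambda x: x[1], reverse=True)
--
--     return [item for item, score in scored]
-- ===== SOURCE B (Python) =====
-- def _rank_by_impact(items):
--     def _score(item):
--         contrarian_words = ['but', 'actually', 'surprisingly', 'not', 'instead', 'however']
--         return ((2 if any(c.isdigit() for c in item) else 0)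
--                 + (3 if any(w in item.lower() for w in contrarian_words) else 0)
--                 + (1 if len(item) > 40 else 0))
--     # bucket pass per score, highest first: reproduces the stable descending sort
--     return [item for s in range(6, -1, -1) for item in items if _score(item) == s]
-- ===== Notes on version B (the rewrite author's own statement) =====
-- stated objective: alternative
-- what changed: Replaces the build-tuples-then-stable-sort pipeline with a bucket/counting pass: one filtering sweep per score value 6..0 concatenated in descending order, which reproduces the stable descending ordering without any sort.
import Mathlib
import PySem

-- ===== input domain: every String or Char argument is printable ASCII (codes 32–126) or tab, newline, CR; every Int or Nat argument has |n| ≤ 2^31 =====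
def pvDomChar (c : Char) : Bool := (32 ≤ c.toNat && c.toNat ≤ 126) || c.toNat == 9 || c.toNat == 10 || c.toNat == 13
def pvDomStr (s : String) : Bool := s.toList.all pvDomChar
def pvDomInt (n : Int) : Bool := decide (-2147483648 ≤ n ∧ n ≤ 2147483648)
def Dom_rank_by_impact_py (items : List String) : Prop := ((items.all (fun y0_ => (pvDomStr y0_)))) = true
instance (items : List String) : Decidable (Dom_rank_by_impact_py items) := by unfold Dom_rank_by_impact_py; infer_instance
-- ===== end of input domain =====

-- B replaces A's build-pairs-then-stable-sort with seven descending bucket sweeps (no sort); same return value, no speed claim.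

-- ===== PORT A =====
-- A's inner helper score_item, transliterated
def scoreItemA (item : String) : Int :=
  let score : Int := 0
  let score := if item.toList.any (fun c => PySem.Chars.isdigit c) then score + 2 else score
  let contrarian_words : List String := ["but", "actually", "surprisingly", "not", "instead", "however"]
  let score := if contrarian_words.any (fun w => PySem.Str.isIn w (PySem.Str.lower item)) then score + 3 else score
  let score := if 40 < PySem.Str.len item then score + 1 else score
  score

def rank_by_impact_py (items : List String) : List String :=
  let scored := items.map (fun item => (item, scoreItemA item))
  let scored := PySem.List.sorted scored (fun x => x.2) true
  scored.map (fun x => x.1)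

-- ===== PORT B =====
-- B's inner helper _score (same heuristic, written as a sum of three terms)
def scoreAlt (item : String) : Int :=
  (if item.toList.any (fun c => PySem.Chars.isdigit c) then 2 else 0)
  + (if (["but", "actually", "surprisingly", "not", "instead", "however"] : List String).any
        (fun w => PySem.Str.isIn w (PySem.Str.lower item)) then 3 else 0)
  + (if 40 < PySem.Str.len item then 1 else 0)

def rank_by_impact_py_alt (items : List String) : List String :=
  (PySem.List.pyRange 6 (-1) (-1)).flatMap (fun s => items.filter (fun item => scoreAlt item == s))

-- ===== PRECONDITION & SPEC =====
def Spec_rank_by_impact_py (items : List String) (out : List String) : Prop := out = rank_by_impact_py_alt items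
instance (items : List String) (out : List String) : Decidable (Spec_rank_by_impact_py items out) := by unfold Spec_rank_by_impact_py; infer_instance

-- ===== CLAIM (what is proved, stated in full; the proofs are below) =====
def Claim_equal_rank_by_impact_py : Prop := ∀ (items : List String), Dom_rank_by_impact_py items → Spec_rank_by_impact_py items (rank_by_impact_py items)

-- ===== LEMMAS AND PROOFS =====

theorem score_eq (item : String) : scoreItemA item = scoreAlt item := by
  simp only [scoreItemA, scoreAlt]
  split_ifs <;> omega

theorem score_range (item : String) : 0 ≤ scoreAlt item ∧ scoreAlt item ≤ 6 := by
  simp only [scoreAlt]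
  split_ifs <;> omega

theorem insertBy_append_left {α : Type} (bef : α → α → Bool) (x : α) (A B : List α)
    (h : ∀ a ∈ A, bef x a = false) :
    PySem.List.insertBy bef x (A ++ B) = A ++ PySem.List.insertBy bef x B := by
  induction A with
  | nil => simp
  | cons a A ih =>
    simp [PySem.List.insertBy, h a (by simp)]
    exact ih (fun a ha => h a (by simp [ha]))

theorem insertBy_all_before {α : Type} (bef : α → α → Bool) (x : α) (B : List α)
    (h : ∀ a ∈ B, bef x a = true) :
    PySem.List.insertBy bef x B = x :: B := by
  cases B with
  | nil => simp [PySem.List.insertBy]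
  | cons b B => simp [PySem.List.insertBy, h b (by simp)]

theorem insertBy_flatMap {α : Type} (key : α → Int) (x : α) (xs : List α) :
    ∀ vals : List Int, vals.Pairwise (· > ·) → key x ∈ vals →
    PySem.List.insertBy (fun a b => decide (key b < key a)) x
        (vals.flatMap (fun v => xs.filter (fun a => key a == v)))
    = vals.flatMap (fun v => xs.filter (fun a => key a == v) ++ if key x = v then [x] else []) := by
  intro vals
  induction vals with
  | nil => simp
  | cons v rest ih =>
    intro hp hm
    have hFv : ∀ a ∈ xs.filter (fun a => key a == v),
        (fun a b => decide (key b < key a)) x a = false := by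
      intro a ha
      have : key a = v := by simpa using (List.of_mem_filter ha)
      by_cases hxv : key x = v
      · simp [this, hxv]
      · have hx : key x ∈ rest := (List.mem_cons.mp hm).resolve_left hxv
        have : v > key x := (List.pairwise_cons.mp hp).1 _ hx
        simp only [decide_eq_false_iff_not]
        omega
    by_cases hxv : key x = v
    · have htail : ∀ a ∈ rest.flatMap (fun v => xs.filter (fun a => key a == v)),
          (fun a b => decide (key b < key a)) x a = true := by
        intro a ha
        obtain ⟨v', hv', ha'⟩ := List.mem_flatMap.mp ha
        have hk : key a = v' := by simpa using (List.of_mem_filter ha')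
        have : v > v' := (List.pairwise_cons.mp hp).1 _ hv'
        simp only [decide_eq_true_eq]
        omega
      have hrest : rest.flatMap (fun v => xs.filter (fun a => key a == v) ++ if key x = v then [x] else [])
          = rest.flatMap (fun v => xs.filter (fun a => key a == v)) := by
        apply List.flatMap_congr
        intro v' hv'
        have : v > v' := (List.pairwise_cons.mp hp).1 _ hv'
        have : key x ≠ v' := by omega
        simp [this]
      simp only [List.flatMap_cons]
      rw [insertBy_append_left _ _ _ _ hFv, insertBy_all_before _ _ _ htail, hrest]
      simp [hxv]
    · have hx : key x ∈ rest := (List.mem_cons.mp hm).resolve_left hxv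
      simp only [List.flatMap_cons]
      rw [insertBy_append_left _ _ _ _ hFv, ih (List.pairwise_cons.mp hp).2 hx]
      simp [hxv]

theorem sorted_eq_buckets {α : Type} (key : α → Int) (xs : List α)
    (h : ∀ a ∈ xs, 0 ≤ key a ∧ key a ≤ 6) :
    PySem.List.sorted xs key true
      = ([6, 5, 4, 3, 2, 1, 0] : List Int).flatMap (fun v => xs.filter (fun a => key a == v)) := by
  rw [PySem.List.sorted_rev_eq_foldl_insertBy]
  induction xs using List.reverseRecOn with
  | nil => simp
  | append_singleton xs x ih =>
    rw [List.foldl_append]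
    simp only [List.foldl_cons, List.foldl_nil]
    rw [ih (fun a ha => h a (by simp [ha]))]
    have hx := h x (by simp)
    rw [insertBy_flatMap key x xs _ (by decide) (by simp; omega)]
    apply List.flatMap_congr
    intro v hv
    simp [List.filter_append, List.filter_singleton, Bool.cond_eq_ite]

-- ===== VERDICT (by name: the statement is the Claim_ definition above) =====
theorem rank_by_impact_py_spec : Claim_equal_rank_by_impact_py := by
  intro items _
  unfold Spec_rank_by_impact_py
  simp only [rank_by_impact_py, rank_by_impact_py_alt]
  have hrange : PySem.List.pyRange 6 (-1) (-1) = ([6, 5, 4, 3, 2, 1, 0] : List Int) := by decide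
  rw [hrange]
  rw [sorted_eq_buckets (fun x => x.2) (items.map (fun item => (item, scoreItemA item)))
      (by
        intro a ha
        obtain ⟨it, _, rfl⟩ := List.mem_map.mp ha
        simpa [score_eq] using score_range it)]
  rw [List.map_flatMap]
  apply List.flatMap_congr
  intro v hv
  rw [List.filter_map]
  rw [List.map_map]
  simp [Function.comp_def, score_eq]
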